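-- pv_equiv track=rewrite | github.com/orzuk/Pareto | PartialOrders.py | permutations_partial_order_iter
-- ===== SOURCE A (Python) =====
-- def permutations_partial_order_iter(n, e):
--     if n == 1:
--         yield [0]
--     else:
--         f = [edge for edge in e if n-1 == edge[0]]  # (n-1, j)
--         g = [edge for edge in e if n-1 == edge[1]]  # (j, n-1)
--         for p in permutations_partial_order_iter(n-1,  [edge for edge in e if n-1 not in edge]):  # take away one element
--             for i in range(n):  # where to insert n-th element
--                 good_perm = True
--                 for edge in f:  # check consistency with pairs
--                     if edge[1] in p[:i]:
--                         good_perm = False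
--                         break
--                 if good_perm:
--                     for edge in g:  # check consistency with pairs
--                         if edge[0] in p[i:]:
--                             good_perm = False
--                             break
--                     if good_perm:
--                         yield p[:i] + [n-1] + p[i:]
-- ===== SOURCE B (Python) =====
-- def permutations_partial_order_iter(n, e):
--     # Bottom-up: build all linear extensions of sizes 1..n; for each partial
--     # permutation the valid insertion positions form a contiguous range [lo, hi],
--     # computed directly from the positions of the new element's predecessors and
--     # successors rather than by testing each candidate position separately.
--     levels = [e]  # levels[k] = edges visible when inserting element n-1-k
--     for m in range(n - 1, 1, -1):
--         levels.append([edge for edge in levels[-1] if m not in edge])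
--     levels.reverse()  # levels[m-2] = edges visible when inserting element m-1
--     perms = [[0]]
--     for m in range(2, n + 1):
--         em = levels[m - 2]
--         succs = [edge[1] for edge in em if edge[0] == m - 1]
--         preds = [edge[0] for edge in em if edge[1] == m - 1]
--         out = []
--         for p in perms:
--             lo, hi = 0, m - 1
--             for j in preds:
--                 if j in p:
--                     lo = max(lo, p.index(j) + 1)
--             for s in succs:
--                 if s in p:
--                     hi = min(hi, p.index(s))
--             for i in range(lo, hi + 1):
--                 out.append(p[:i] + [m - 1] + p[i:])
--         perms = out
--     for p in perms:
--         yield p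
-- ===== Notes on version B (the rewrite author's own statement) =====
-- stated objective: alternative
-- what changed: Bottom-up iterative build replaces the top-down recursion, and for each partial extension the contiguous valid insertion range [lo, hi] is computed once from predecessor/successor positions instead of testing every insertion position with per-position prefix/suffix membership scans.
import Mathlib
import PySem

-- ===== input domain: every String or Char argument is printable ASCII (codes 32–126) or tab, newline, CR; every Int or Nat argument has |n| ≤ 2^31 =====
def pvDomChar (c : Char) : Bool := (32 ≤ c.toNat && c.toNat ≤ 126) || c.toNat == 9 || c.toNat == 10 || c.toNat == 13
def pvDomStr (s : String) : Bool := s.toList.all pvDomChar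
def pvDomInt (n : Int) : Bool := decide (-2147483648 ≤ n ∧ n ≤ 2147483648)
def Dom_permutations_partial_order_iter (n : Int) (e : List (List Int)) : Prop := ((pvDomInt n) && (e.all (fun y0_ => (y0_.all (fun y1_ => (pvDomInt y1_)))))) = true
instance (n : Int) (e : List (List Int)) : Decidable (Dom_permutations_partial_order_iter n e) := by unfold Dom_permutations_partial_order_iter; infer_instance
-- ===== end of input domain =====

-- B replaces the top-down recursion by a bottom-up iterative build that computes, for each
-- partial extension, the contiguous valid insertion range [lo, hi] directly from the positions
-- of the inserted element's predecessors/successors (objective: alternative algorithm).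


-- ===== PORT A =====
-- Literal port of the recursive generator (the yielded values collected in order).
-- edge[0] / edge[1] are ported as pyGetD with default 0: Python raises IndexError on edges
-- shorter than 2 there, which Pre_ excludes.  The 'n ≤ 1' guard is a totality guard only:
-- the Python recurses forever (RecursionError) for n ≤ 0, which Pre_ excludes.
def permutations_partial_order_iter (n : Int) (e : List (List Int)) : List (List Int) :=
  if n = 1 then [[0]]
  else if n ≤ 1 then []
  else
    let f := e.filter (fun edge => decide (n - 1 = PySem.List.pyGetD edge 0 0))
    let g := e.filter (fun edge => decide (n - 1 = PySem.List.pyGetD edge 1 0))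
    let prev := permutations_partial_order_iter (n - 1) (e.filter (fun edge => !(edge.contains (n - 1))))
    prev.foldl (fun acc p =>
      (PySem.List.pyRange 0 n 1).foldl (fun acc2 i =>
        if (!(f.any (fun edge => (PySem.List.slice p none (some i)).contains (PySem.List.pyGetD edge 1 0)))) &&
           (!(g.any (fun edge => (PySem.List.slice p (some i) none).contains (PySem.List.pyGetD edge 0 0))))
        then acc2 ++ [PySem.List.slice p none (some i) ++ [n - 1] ++ PySem.List.slice p (some i) none]
        else acc2) acc) []
termination_by n.toNat
decreasing_by omega

-- ===== PORT B =====
-- Literal port of Source B (levels[-1] via pyGet? with default [], never used: the list is nonempty).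
def permutations_partial_order_iter_alt (n : Int) (e : List (List Int)) : List (List Int) :=
  let levels := ((PySem.List.pyRange (n - 1) 1 (-1)).foldl
      (fun ls m => ls ++ [((PySem.List.pyGet? ls (-1)).getD []).filter (fun edge => !(edge.contains m))])
      [e]).reverse
  (PySem.List.pyRange 2 (n + 1) 1).foldl (fun perms m =>
    let em := PySem.List.pyGetD levels (m - 2) []
    let succs := (em.filter (fun edge => decide (PySem.List.pyGetD edge 0 0 = m - 1))).map
        (fun edge => PySem.List.pyGetD edge 1 0)
    let preds := (em.filter (fun edge => decide (PySem.List.pyGetD edge 1 0 = m - 1))).map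
        (fun edge => PySem.List.pyGetD edge 0 0)
    perms.foldl (fun out p =>
      let lo := preds.foldl (fun lo j =>
        if p.contains j then max lo ((((PySem.List.index? p j).getD 0 : Nat) : Int) + 1) else lo) 0
      let hi := succs.foldl (fun hi s =>
        if p.contains s then min hi (((PySem.List.index? p s).getD 0 : Nat) : Int) else hi) (m - 1)
      (PySem.List.pyRange lo (hi + 1) 1).foldl (fun out2 i =>
        out2 ++ [PySem.List.slice p none (some i) ++ [m - 1] ++ PySem.List.slice p (some i) none]) out) []) [[0]]

-- ===== PRECONDITION & SPEC =====
-- Pre_ excludes exactly the inputs where the Python A raises: n ≤ 0 (infinite recursion /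
-- RecursionError) and, for n ≥ 2, an edge shorter than 2 entries (IndexError on edge[0]/edge[1]).
def Pre_permutations_partial_order_iter (n : Int) (e : List (List Int)) : Prop :=
  1 ≤ n ∧ (n = 1 ∨ ∀ ed ∈ e, 2 ≤ ed.length)
instance (n : Int) (e : List (List Int)) : Decidable (Pre_permutations_partial_order_iter n e) := by
  unfold Pre_permutations_partial_order_iter; infer_instance

def pvWitness_permutations_partial_order_iter : Int × List (List Int) := (3, [[0, 1], [1, 2]])

def Spec_permutations_partial_order_iter (n : Int) (e : List (List Int)) (out : List (List Int)) : Prop := out = permutations_partial_order_iter_alt n e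
instance (n : Int) (e : List (List Int)) (out : List (List Int)) : Decidable (Spec_permutations_partial_order_iter n e out) := by unfold Spec_permutations_partial_order_iter; infer_instance

-- ===== CLAIM (what is proved, stated in full; the proofs are below) =====
def Claim_equal_permutations_partial_order_iter : Prop := ∀ (n : Int) (e : List (List Int)), Dom_permutations_partial_order_iter n e → Pre_permutations_partial_order_iter n e → Spec_permutations_partial_order_iter n e (permutations_partial_order_iter n e)

-- ===== LEMMAS AND PROOFS =====

def pvInsAt (v : Int) (p : List Int) (i : Int) : List Int :=
  PySem.List.slice p none (some i) ++ [v] ++ PySem.List.slice p (some i) none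

def pvCondA (f g : List (List Int)) (p : List Int) (i : Int) : Bool :=
  (!(f.any (fun edge => (PySem.List.slice p none (some i)).contains (PySem.List.pyGetD edge 1 0)))) &&
  (!(g.any (fun edge => (PySem.List.slice p (some i) none).contains (PySem.List.pyGetD edge 0 0))))

def pvStepA (n : Int) (e : List (List Int)) (prev : List (List Int)) : List (List Int) :=
  let f := e.filter (fun edge => decide (n - 1 = PySem.List.pyGetD edge 0 0))
  let g := e.filter (fun edge => decide (n - 1 = PySem.List.pyGetD edge 1 0))
  prev.foldl (fun acc p =>
    (PySem.List.pyRange 0 n 1).foldl (fun acc2 i =>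
      if (!(f.any (fun edge => (PySem.List.slice p none (some i)).contains (PySem.List.pyGetD edge 1 0)))) &&
         (!(g.any (fun edge => (PySem.List.slice p (some i) none).contains (PySem.List.pyGetD edge 0 0))))
      then acc2 ++ [PySem.List.slice p none (some i) ++ [n - 1] ++ PySem.List.slice p (some i) none]
      else acc2) acc) []

def pvLo (preds p : List Int) : Int :=
  preds.foldl (fun lo j =>
    if p.contains j then max lo ((((PySem.List.index? p j).getD 0 : Nat) : Int) + 1) else lo) 0

def pvHi (m : Int) (succs p : List Int) : Int :=
  succs.foldl (fun hi s =>
    if p.contains s then min hi (((PySem.List.index? p s).getD 0 : Nat) : Int) else hi) (m - 1)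

def pvStepB (m : Int) (em : List (List Int)) (prev : List (List Int)) : List (List Int) :=
  let succs := (em.filter (fun edge => decide (PySem.List.pyGetD edge 0 0 = m - 1))).map
      (fun edge => PySem.List.pyGetD edge 1 0)
  let preds := (em.filter (fun edge => decide (PySem.List.pyGetD edge 1 0 = m - 1))).map
      (fun edge => PySem.List.pyGetD edge 0 0)
  prev.foldl (fun out p =>
    let lo := preds.foldl (fun lo j =>
      if p.contains j then max lo ((((PySem.List.index? p j).getD 0 : Nat) : Int) + 1) else lo) 0
    let hi := succs.foldl (fun hi s =>
      if p.contains s then min hi (((PySem.List.index? p s).getD 0 : Nat) : Int) else hi) (m - 1)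
    (PySem.List.pyRange lo (hi + 1) 1).foldl (fun out2 i =>
      out2 ++ [PySem.List.slice p none (some i) ++ [m - 1] ++ PySem.List.slice p (some i) none]) out) []

lemma pv_foldl_outer {γ α : Type} (prev : List γ) (f : List α → γ → List α)
    (L : γ → List α) (init : List α) (h : ∀ acc p, f acc p = acc ++ L p) :
    prev.foldl f init = init ++ prev.flatMap L := by
  induction prev generalizing init with
  | nil => simp
  | cons q t ih => simp [h, ih, List.append_assoc]

lemma pvStepA_eq_flatMap (n : Int) (e : List (List Int)) (prev : List (List Int)) :
    pvStepA n e prev = prev.flatMap (fun p =>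
      ((PySem.List.pyRange 0 n 1).filter
        (pvCondA (e.filter (fun edge => decide (n - 1 = PySem.List.pyGetD edge 0 0)))
                 (e.filter (fun edge => decide (n - 1 = PySem.List.pyGetD edge 1 0))) p)).map
        (pvInsAt (n - 1) p)) := by
  simp only [pvStepA]
  rw [pv_foldl_outer prev _
      (fun p => ((PySem.List.pyRange 0 n 1).filter
        (pvCondA (e.filter (fun edge => decide (n - 1 = PySem.List.pyGetD edge 0 0)))
                 (e.filter (fun edge => decide (n - 1 = PySem.List.pyGetD edge 1 0))) p)).map
        (pvInsAt (n - 1) p)) []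
      (fun acc p => by
        simp only [pvCondA, pvInsAt]
        exact PySem.List.foldl_append_if _ _ _ _)]
  simp

lemma pvStepB_eq_flatMap (m : Int) (em : List (List Int)) (prev : List (List Int)) :
    pvStepB m em prev = prev.flatMap (fun p =>
      (PySem.List.pyRange
        (pvLo ((em.filter (fun edge => decide (PySem.List.pyGetD edge 1 0 = m - 1))).map
            (fun edge => PySem.List.pyGetD edge 0 0)) p)
        (pvHi m ((em.filter (fun edge => decide (PySem.List.pyGetD edge 0 0 = m - 1))).map
            (fun edge => PySem.List.pyGetD edge 1 0)) p + 1) 1).map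
        (pvInsAt (m - 1) p)) := by
  simp only [pvStepB]
  rw [pv_foldl_outer prev _
      (fun p => (PySem.List.pyRange
        (pvLo ((em.filter (fun edge => decide (PySem.List.pyGetD edge 1 0 = m - 1))).map
            (fun edge => PySem.List.pyGetD edge 0 0)) p)
        (pvHi m ((em.filter (fun edge => decide (PySem.List.pyGetD edge 0 0 = m - 1))).map
            (fun edge => PySem.List.pyGetD edge 1 0)) p + 1) 1).map
        (pvInsAt (m - 1) p)) []
      (fun acc p => by
        simp only [pvLo, pvHi, pvInsAt]
        exact PySem.List.foldl_append_singleton_eq_map _ _ _)]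
  simp

lemma pv_foldl_max_le_iff (l : List Int) (c : Int → Bool) (v : Int → Int) (a i : Int) :
    (l.foldl (fun acc j => if c j then max acc (v j) else acc) a) ≤ i ↔
      a ≤ i ∧ ∀ j ∈ l, c j = true → v j ≤ i := by
  induction l generalizing a with
  | nil => simp
  | cons x t ih =>
    simp only [List.foldl_cons, List.mem_cons]
    by_cases hc : c x = true
    · simp only [hc, if_true, ih, max_le_iff]
      constructor
      · rintro ⟨⟨h0, h1⟩, h2⟩
        refine ⟨h0, fun j hj hcj => ?_⟩
        rcases hj with rfl | hj
        · exact h1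
        · exact h2 j hj hcj
      · rintro ⟨h0, h2⟩
        exact ⟨⟨h0, h2 x (Or.inl rfl) hc⟩, fun j hj hcj => h2 j (Or.inr hj) hcj⟩
    · simp only [hc, ih]
      constructor
      · rintro ⟨h1, h2⟩
        refine ⟨h1, fun j hj hcj => ?_⟩
        rcases hj with rfl | hj
        · exact absurd hcj hc
        · exact h2 j hj hcj
      · rintro ⟨h1, h2⟩; exact ⟨h1, fun j hj hcj => h2 j (Or.inr hj) hcj⟩

lemma pv_le_foldl_min_iff (l : List Int) (c : Int → Bool) (v : Int → Int) (a i : Int) :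
    i ≤ (l.foldl (fun acc j => if c j then min acc (v j) else acc) a) ↔
      i ≤ a ∧ ∀ j ∈ l, c j = true → i ≤ v j := by
  induction l generalizing a with
  | nil => simp
  | cons x t ih =>
    simp only [List.foldl_cons, List.mem_cons]
    by_cases hc : c x = true
    · simp only [hc, if_true, ih, le_min_iff]
      constructor
      · rintro ⟨⟨h0, h1⟩, h2⟩
        refine ⟨h0, fun j hj hcj => ?_⟩
        rcases hj with rfl | hj
        · exact h1
        · exact h2 j hj hcj
      · rintro ⟨h0, h2⟩
        exact ⟨⟨h0, h2 x (Or.inl rfl) hc⟩, fun j hj hcj => h2 j (Or.inr hj) hcj⟩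
    · simp only [hc, ih]
      constructor
      · rintro ⟨h1, h2⟩
        refine ⟨h1, fun j hj hcj => ?_⟩
        rcases hj with rfl | hj
        · exact absurd hcj hc
        · exact h2 j hj hcj
      · rintro ⟨h1, h2⟩; exact ⟨h1, fun j hj hcj => h2 j (Or.inr hj) hcj⟩

lemma pvLo_nonneg (preds p : List Int) : 0 ≤ pvLo preds p := by
  have := (pv_foldl_max_le_iff preds (fun j => p.contains j)
    (fun j => (((PySem.List.index? p j).getD 0 : Nat) : Int) + 1) 0 (pvLo preds p)).mp le_rfl
  exact this.1

lemma pvHi_le (m : Int) (succs p : List Int) : pvHi m succs p ≤ m - 1 := by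
  have := (pv_le_foldl_min_iff succs (fun s => p.contains s)
    (fun s => (((PySem.List.index? p s).getD 0 : Nat) : Int)) (m - 1) (pvHi m succs p)).mp le_rfl
  exact this.1

lemma pv_mem_take_iff (p : List Int) (v : Int) (k : Nat) :
    v ∈ p.take k ↔ v ∈ p ∧ p.idxOf v < k := by
  induction p generalizing k with
  | nil => simp
  | cons x t ih =>
    cases k with
    | zero => simp
    | succ k =>
      by_cases hx : x = v
      · subst hx; simp [List.idxOf_cons_self]
      · have hvx : ¬ v = x := fun hh => hx hh.symm
        simp only [List.take_succ_cons, List.mem_cons, ih, List.idxOf_cons_ne _ hx]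
        constructor
        · rintro (rfl | ⟨hm, hlt⟩)
          · exact absurd rfl hvx
          · exact ⟨Or.inr hm, by omega⟩
        · rintro ⟨rfl | hm, hlt⟩
          · exact absurd rfl hvx
          · exact Or.inr ⟨hm, by omega⟩

lemma pv_mem_drop_iff (p : List Int) (hp : p.Nodup) (v : Int) (k : Nat) :
    v ∈ p.drop k ↔ v ∈ p ∧ k ≤ p.idxOf v := by
  induction p generalizing k with
  | nil => simp
  | cons x t ih =>
    cases k with
    | zero => simp
    | succ k =>
      have hp' := (List.nodup_cons.mp hp).2
      have hxt := (List.nodup_cons.mp hp).1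
      by_cases hx : x = v
      · subst hx
        simp only [List.drop_succ_cons, List.mem_cons, List.idxOf_cons_self]
        constructor
        · intro hm; exact absurd (List.mem_of_mem_drop hm) hxt
        · rintro ⟨_, hk⟩; omega
      · have hvx : ¬ v = x := fun hh => hx hh.symm
        simp only [List.drop_succ_cons, List.mem_cons, ih hp', List.idxOf_cons_ne _ hx]
        constructor
        · rintro ⟨hm, hk⟩; exact ⟨Or.inr hm, by omega⟩
        · rintro ⟨rfl | hm, hk⟩
          · exact absurd rfl hvx
          · exact ⟨hm, by omega⟩

lemma pv_idxOf?_eq_some (p : List Int) (v : Int) (h : v ∈ p) :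
    List.idxOf? v p = some (List.idxOf v p) := by
  induction p with
  | nil => simp at h
  | cons x t ih =>
    by_cases hx : x = v
    · subst hx; simp [List.idxOf?_cons, List.idxOf_cons_self]
    · have hvx : ¬ v = x := fun hh => hx hh.symm
      rcases List.mem_cons.mp h with rfl | ht
      · exact absurd rfl hvx
      · simp [List.idxOf?_cons, hx, ih ht, beq_iff_eq, List.idxOf_cons_ne _ hx]

lemma pv_index_getD_of_mem (p : List Int) (v : Int) (h : v ∈ p) :
    ((PySem.List.index? p v).getD 0 : Nat) = p.idxOf v := by
  rw [PySem.List.index?_eq_idxOf?, pv_idxOf?_eq_some p v h]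
  rfl

lemma pvfilt_aux (lo hi : Int) : ∀ (k : Nat) (a b : Int), (b - a).toNat = k →
    (PySem.List.pyRange a b 1).filter (fun i => decide (lo ≤ i ∧ i ≤ hi)) =
      PySem.List.pyRange (max a lo) (min b (hi + 1)) 1 := by
  intro k
  induction k with
  | zero =>
    intro a b hk
    have hba : b ≤ a := by omega
    rw [PySem.List.pyRange_one_eq_nil hba, PySem.List.pyRange_one_eq_nil (by omega)]
    rfl
  | succ k ih =>
    intro a b hk
    have hab : a < b := by omega
    rw [PySem.List.pyRange_one_cons hab]
    by_cases hca : lo ≤ a ∧ a ≤ hi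
    · rw [List.filter_cons_of_pos (by simpa using hca)]
      rw [ih (a + 1) b (by omega)]
      have h1 : max a lo = a := by omega
      have h2 : max (a + 1) lo = a + 1 := by omega
      rw [h1, h2, show PySem.List.pyRange a (min b (hi + 1)) 1
            = a :: PySem.List.pyRange (a + 1) (min b (hi + 1)) 1
          from PySem.List.pyRange_one_cons (lt_min (by omega) (by omega))]
    · rw [List.filter_cons_of_neg (by simpa using hca)]
      rw [ih (a + 1) b (by omega)]
      rcases not_and_or.mp hca with h | h
      · have h1 : max a lo = lo := by omega
        have h2 : max (a + 1) lo = lo := by omega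
        rw [h1, h2]
      · have hm : min b (hi + 1) ≤ hi + 1 := min_le_right _ _
        have h1 : min b (hi + 1) ≤ max a lo := le_trans hm (by have := le_max_left a lo; omega)
        have h2 : min b (hi + 1) ≤ max (a + 1) lo := le_trans hm (by have := le_max_left (a+1) lo; omega)
        rw [PySem.List.pyRange_one_eq_nil h1, PySem.List.pyRange_one_eq_nil h2]

lemma pv_filter_pyRange_interval (lo hi n : Int) (h0 : 0 ≤ lo) (h1 : hi ≤ n - 1) :
    (PySem.List.pyRange 0 n 1).filter (fun i => decide (lo ≤ i ∧ i ≤ hi)) =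
      PySem.List.pyRange lo (hi + 1) 1 := by
  rw [pvfilt_aux lo hi (n - 0).toNat 0 n rfl]
  rw [max_eq_right h0, min_eq_right (by omega)]

lemma pv_filter_cond_eq_range (n : Int) (hn : 2 ≤ n) (f g : List (List Int))
    (p : List Int) (hp : p.Nodup) :
    (PySem.List.pyRange 0 n 1).filter (pvCondA f g p) =
      PySem.List.pyRange
        (pvLo (g.map (fun edge => PySem.List.pyGetD edge 0 0)) p)
        (pvHi n (f.map (fun edge => PySem.List.pyGetD edge 1 0)) p + 1) 1 := by
  set preds := g.map (fun edge => PySem.List.pyGetD edge 0 0) with hpreds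
  set succs := f.map (fun edge => PySem.List.pyGetD edge 1 0) with hsuccs
  rw [← pv_filter_pyRange_interval (pvLo preds p) (pvHi n succs p) n
        (pvLo_nonneg _ _) (pvHi_le _ _ _)]
  apply List.filter_congr
  intro i hi
  have hmem := (PySem.List.mem_pyRange_one).mp hi
  have h0i : 0 ≤ i := hmem.1
  have hin : i < n := hmem.2
  have hslice1 : PySem.List.slice p none (some i) = p.take i.toNat :=
    PySem.List.slice_to p h0i
  have hslice2 : PySem.List.slice p (some i) none = p.drop i.toNat :=
    PySem.List.slice_from p h0i
  rw [Bool.eq_iff_iff, decide_eq_true_iff]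
  simp only [pvCondA, Bool.and_eq_true, Bool.not_eq_true', List.any_eq_false,
    hslice1, hslice2]
  have hf : (∀ edge ∈ f, ¬ (((p.take i.toNat).contains (PySem.List.pyGetD edge 1 0)) = true)) ↔
      (i ≤ pvHi n succs p) := by
    rw [pvHi, pv_le_foldl_min_iff]
    constructor
    · intro h
      refine ⟨by omega, fun s hs hc => ?_⟩
      rcases List.mem_map.mp hs with ⟨edge, hedge, rfl⟩
      have h1 := h edge hedge
      have hsp : PySem.List.pyGetD edge 1 0 ∈ p := List.contains_iff_mem.mp hc
      have hnt : PySem.List.pyGetD edge 1 0 ∉ p.take i.toNat := by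
        simpa using h1
      rw [pv_mem_take_iff] at hnt
      push_neg at hnt
      have h2 := hnt hsp
      rw [pv_index_getD_of_mem p _ hsp]
      omega
    · rintro ⟨-, h⟩ edge hedge
      rw [List.contains_iff_mem]
      intro hm
      rw [pv_mem_take_iff] at hm
      have hidx := h _ (List.mem_map_of_mem hedge)
        (List.contains_iff_mem.mpr hm.1)
      rw [pv_index_getD_of_mem p _ hm.1] at hidx
      omega
  have hg : (∀ edge ∈ g, ¬ (((p.drop i.toNat).contains (PySem.List.pyGetD edge 0 0)) = true)) ↔
      (pvLo preds p ≤ i) := by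
    rw [pvLo, pv_foldl_max_le_iff]
    constructor
    · intro h
      refine ⟨h0i, fun j hj hc => ?_⟩
      rcases List.mem_map.mp hj with ⟨edge, hedge, rfl⟩
      have h1 := h edge hedge
      have hjp : PySem.List.pyGetD edge 0 0 ∈ p := List.contains_iff_mem.mp hc
      have hnd : PySem.List.pyGetD edge 0 0 ∉ p.drop i.toNat := by
        simpa using h1
      rw [pv_mem_drop_iff p hp] at hnd
      push_neg at hnd
      have := hnd hjp
      rw [pv_index_getD_of_mem p _ hjp]
      omega
    · rintro ⟨-, h⟩ edge hedge
      rw [List.contains_iff_mem]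
      intro hm
      rw [pv_mem_drop_iff p hp] at hm
      have hidx := h _ (List.mem_map_of_mem hedge)
        (List.contains_iff_mem.mpr hm.1)
      rw [pv_index_getD_of_mem p _ hm.1] at hidx
      omega
  rw [hf, hg]
  exact and_comm


lemma pv_filter_swap (n : Int) (e : List (List Int)) (k : Int) :
    e.filter (fun edge => decide (n - 1 = PySem.List.pyGetD edge k 0)) =
      e.filter (fun edge => decide (PySem.List.pyGetD edge k 0 = n - 1)) := by
  apply List.filter_congr
  intro ed _
  rw [decide_eq_decide]
  exact eq_comm

lemma pvStep_eq (n : Int) (hn : 2 ≤ n) (e : List (List Int)) (prev : List (List Int))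
    (hprev : ∀ p ∈ prev, p.Nodup) : pvStepA n e prev = pvStepB n e prev := by
  rw [pvStepA_eq_flatMap, pvStepB_eq_flatMap]
  apply List.flatMap_congr
  intro p hp
  rw [pv_filter_cond_eq_range n hn _ _ p (hprev p hp)]
  rw [pv_filter_swap n e 0, pv_filter_swap n e 1]

def pvLevelStep (ls : List (List (List Int))) (m : Int) : List (List (List Int)) :=
  ls ++ [((PySem.List.pyGet? ls (-1)).getD []).filter (fun edge => !(edge.contains m))]

def pvLevels (n : Int) (e : List (List Int)) : List (List (List Int)) :=
  ((PySem.List.pyRange (n - 1) 1 (-1)).foldl pvLevelStep [e]).reverse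

lemma pv_foldl_levelStep_length : ∀ (r : List Int) (ls : List (List (List Int))),
    (r.foldl pvLevelStep ls).length = ls.length + r.length := by
  intro r
  induction r with
  | nil => simp
  | cons x t ih =>
    intro ls
    simp only [List.foldl_cons, ih, pvLevelStep]
    simp
    omega

lemma pv_foldl_levelStep_prefix : ∀ (r : List Int) (l0 ls : List (List (List Int))),
    ls ≠ [] → r.foldl pvLevelStep (l0 ++ ls) = l0 ++ r.foldl pvLevelStep ls := by
  intro r
  induction r with
  | nil => intro l0 ls _; rfl
  | cons x t ih =>
    intro l0 ls hne
    simp only [List.foldl_cons]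
    have hstep : pvLevelStep (l0 ++ ls) x = l0 ++ pvLevelStep ls x := by
      unfold pvLevelStep
      rw [PySem.List.pyGet?_neg_one, PySem.List.pyGet?_neg_one,
        List.getLast?_append]
      rcases List.exists_cons_of_ne_nil hne with ⟨y, ys, rfl⟩
      rcases hzl : (y :: ys).getLast? with _ | z
      · simp at hzl
      · simp [hzl, List.append_assoc]
    rw [hstep, ih _ _ (by simp [pvLevelStep])]

lemma pvLevels_length (n : Int) (e : List (List Int)) :
    (pvLevels n e).length = (n - 2).toNat + 1 := by
  unfold pvLevels
  rw [List.length_reverse, pv_foldl_levelStep_length]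
  rw [PySem.List.length_pyRange_neg_one]
  simp
  omega

lemma pvLevels_succ (n : Int) (e : List (List Int)) (h : 3 ≤ n) :
    pvLevels n e = pvLevels (n - 1) (e.filter (fun edge => !(edge.contains (n - 1)))) ++ [e] := by
  unfold pvLevels
  rw [PySem.List.pyRange_neg_one_cons (show (1:Int) < n - 1 by omega)]
  simp only [List.foldl_cons]
  have hstep : pvLevelStep [e] (n - 1) =
      [e] ++ [e.filter (fun edge => !(edge.contains (n - 1)))] := by
    unfold pvLevelStep
    rw [PySem.List.pyGet?_neg_one]
    rfl
  rw [hstep, pv_foldl_levelStep_prefix _ [e] _ (by simp)]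
  rw [List.reverse_append]
  simp

lemma pvB_def (n : Int) (e : List (List Int)) :
    permutations_partial_order_iter_alt n e =
      (PySem.List.pyRange 2 (n + 1) 1).foldl
        (fun perms m => pvStepB m (PySem.List.pyGetD (pvLevels n e) (m - 2) []) perms) [[0]] := rfl

lemma pvA_unfold (n : Int) (e : List (List Int)) (h : 2 ≤ n) :
    permutations_partial_order_iter n e =
      pvStepA n e (permutations_partial_order_iter (n - 1)
        (e.filter (fun edge => !(edge.contains (n - 1))))) := by
  rw [permutations_partial_order_iter]
  rw [if_neg (by omega), if_neg (by omega)]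
  rfl

lemma pvLevels_two (e : List (List Int)) : pvLevels 2 e = [e] := by
  unfold pvLevels
  rw [PySem.List.pyRange_neg_one_eq_nil (by omega)]
  rfl

lemma pv_getD_append_last (L : List (List (List Int))) (e : List (List Int)) (i : Int)
    (h : i = L.length) : PySem.List.pyGetD (L ++ [e]) i [] = e := by
  rw [PySem.List.pyGetD_of_nonneg _ _ (by omega)]
  rw [List.getD_eq_getElem?_getD, List.getElem?_append_right (by omega)]
  simp [h]

lemma pv_getD_append_left (L : List (List (List Int))) (e : List (List Int)) (i : Int)
    (h0 : 0 ≤ i) (h : i < L.length) :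
    PySem.List.pyGetD (L ++ [e]) i [] = PySem.List.pyGetD L i [] := by
  rw [PySem.List.pyGetD_of_nonneg _ _ h0, PySem.List.pyGetD_of_nonneg _ _ h0]
  rw [List.getD_eq_getElem?_getD, List.getD_eq_getElem?_getD,
    List.getElem?_append_left (by omega)]

lemma pvLevels_getD_last (n : Int) (e : List (List Int)) (h : 2 ≤ n) :
    PySem.List.pyGetD (pvLevels n e) (n - 2) [] = e := by
  rcases eq_or_lt_of_le h with rfl | h3
  · rw [pvLevels_two]
    rfl
  · rw [pvLevels_succ n e (by omega)]
    apply pv_getD_append_last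
    rw [pvLevels_length]
    omega

lemma pvLevels_getD_lt (n : Int) (e : List (List Int)) (h : 3 ≤ n) (m : Int)
    (hm : 2 ≤ m) (hmn : m < n) :
    PySem.List.pyGetD (pvLevels n e) (m - 2) [] =
      PySem.List.pyGetD (pvLevels (n - 1) (e.filter (fun edge => !(edge.contains (n - 1))))) (m - 2) [] := by
  rw [pvLevels_succ n e h]
  apply pv_getD_append_left
  · omega
  · rw [pvLevels_length]
    omega

lemma pvB_unfold (n : Int) (e : List (List Int)) (h : 2 ≤ n) :
    permutations_partial_order_iter_alt n e =
      pvStepB n e (permutations_partial_order_iter_alt (n - 1)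
        (e.filter (fun edge => !(edge.contains (n - 1))))) := by
  rw [pvB_def n e, pvB_def (n - 1) _]
  rw [PySem.List.pyRange_one_succ_right (show (2:Int) ≤ n by omega)]
  rw [List.foldl_append]
  simp only [List.foldl_cons, List.foldl_nil]
  rw [pvLevels_getD_last n e h]
  congr 1
  have hrange : PySem.List.pyRange 2 (n - 1 + 1) 1 = PySem.List.pyRange 2 n 1 := by
    norm_num
  rw [hrange]
  apply PySem.List.foldl_congr_mem
  intro acc m hm
  have hmem := (PySem.List.mem_pyRange_one).mp hm
  rw [pvLevels_getD_lt n e (by omega) m (by omega) (by omega)]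

lemma pvA_sound (k : Nat) : ∀ (n : Int) (e : List (List Int)), n.toNat ≤ k →
    ∀ p ∈ permutations_partial_order_iter n e, p.Nodup ∧ ∀ x ∈ p, x ≤ n - 1 := by
  induction k with
  | zero =>
    intro n e hk p hp
    rw [permutations_partial_order_iter, if_neg (by omega), if_pos (by omega)] at hp
    simp at hp
  | succ k ih =>
    intro n e hk p hp
    by_cases hn1 : n = 1
    · subst hn1
      rw [permutations_partial_order_iter, if_pos rfl] at hp
      simp only [List.mem_singleton] at hp
      subst hp
      refine ⟨by simp, ?_⟩
      intro x hx
      simp only [List.mem_singleton] at hx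
      omega
    · by_cases hn0 : n ≤ 1
      · rw [permutations_partial_order_iter, if_neg hn1, if_pos hn0] at hp
        simp at hp
      · rw [pvA_unfold n e (by omega), pvStepA_eq_flatMap] at hp
        rcases List.mem_flatMap.mp hp with ⟨q, hq, hpin⟩
        rcases List.mem_map.mp hpin with ⟨i, hi, rfl⟩
        have hiq := List.mem_filter.mp hi
        have h0i : 0 ≤ i := ((PySem.List.mem_pyRange_one).mp hiq.1).1
        obtain ⟨hqnd, hqle⟩ := ih (n - 1) _ (by omega) q hq
        have hform : pvInsAt (n - 1) q i = q.take i.toNat ++ (n - 1) :: q.drop i.toNat := by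
          unfold pvInsAt
          rw [PySem.List.slice_to q h0i, PySem.List.slice_from q h0i]
          simp
        have hfresh : (n - 1) ∉ q := fun hmem => by have := hqle _ hmem; omega
        constructor
        · rw [hform, List.nodup_middle, List.nodup_cons, List.take_append_drop]
          exact ⟨hfresh, hqnd⟩
        · intro x hx
          rw [hform] at hx
          rcases List.mem_append.mp hx with hx1 | hx2
          · have : x ∈ q := List.mem_of_mem_take hx1
            have := hqle x this
            omega
          · rcases List.mem_cons.mp hx2 with rfl | hx3
            · omega
            · have : x ∈ q := List.mem_of_mem_drop hx3
              have := hqle x this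
              omega

lemma pvMain (k : Nat) : ∀ (n : Int) (e : List (List Int)), n.toNat ≤ k → 1 ≤ n →
    permutations_partial_order_iter n e = permutations_partial_order_iter_alt n e := by
  induction k with
  | zero => intro n e hk h1; omega
  | succ k ih =>
    intro n e hk h1
    by_cases hn1 : n = 1
    · subst hn1
      rw [permutations_partial_order_iter, if_pos rfl, pvB_def]
      rw [PySem.List.pyRange_one_eq_nil (by omega)]
      rfl
    · have h2 : 2 ≤ n := by omega
      calc permutations_partial_order_iter n e
          = pvStepA n e (permutations_partial_order_iter (n - 1)
              (e.filter (fun edge => !(edge.contains (n - 1))))) := pvA_unfold n e h2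
        _ = pvStepB n e (permutations_partial_order_iter (n - 1)
              (e.filter (fun edge => !(edge.contains (n - 1))))) := by
            apply pvStep_eq n h2
            intro p hp
            exact (pvA_sound k (n - 1) _ (by omega) p hp).1
        _ = pvStepB n e (permutations_partial_order_iter_alt (n - 1)
              (e.filter (fun edge => !(edge.contains (n - 1))))) := by
            rw [ih (n - 1) _ (by omega) (by omega)]
        _ = permutations_partial_order_iter_alt n e := (pvB_unfold n e h2).symm

-- ===== VERDICT (by name: the statement is the Claim_ definition above) =====
theorem permutations_partial_order_iter_spec : Claim_equal_permutations_partial_order_iter := by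
  intro n e _ hpre
  unfold Spec_permutations_partial_order_iter
  exact pvMain n.toNat n e le_rfl hpre.1
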